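/-
  GENERATED by c/gen_globals.py from toyh_GLOBALS.txt — do not edit; re-run the script when the image is rebuilt.

  The 1 globals registered with the sanitizer: the descriptor table at 0x141640 (what `_sub_I_65535_1` passes to
  `__asan_register_globals`), `.init_array`, and the evaluated facts `ShadowOK.register` asks for.
-/
import Asan.Runtime
namespace Toyh.Globals
open Asan

/-- The address of the descriptor table (`.data..LASAN0`): the constructor's `edi`. -/
def table : Nat := 0x141640

/-- The number of descriptors: the constructor's `esi`. -/
def count : Nat := 1

/-- `runs`: 8 bytes at 0x141900, slot of 64 bytes (red zone [0x141908, 0x141940)); descriptor at 0x141640. -/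
def runs : GlobalDesc := ⟨0x141900, 8, 64⟩

/-- The table, in table order. -/
def descs : List GlobalDesc := [runs]

/-- `.init_array`: (address of the entry, its value). -/
def initArray : List (Nat × Nat) := [(0x141000, 0x105180)]

/-- The table has `count` descriptors. -/
theorem descs_length : descs.length = count := by decide

/-- Every descriptor is sane: 8-aligned slot, a whole number of granules, containing the global, inside the image. -/
theorem descs_ok : ∀ d, d ∈ descs → d.OK := by decide

/-- The slots are pairwise apart. -/
theorem descs_apart : descs.Pairwise GlobalDesc.Apart := by decide

/-- The objects `ShadowOK.register` adds for this table (reverse table order). -/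
def objs : List Obj := (descs.map GlobalDesc.obj).reverse

/-- The runtime of this image, for the runtime symbols `S` (`Toyh.Symbols.rt`). -/
def runtime (S : RtSymbols) : Runtime := ⟨S, table, descs⟩

end Toyh.Globals
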